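-- pv_equiv track=rewrite | github.com/waynegramlich/bom_manager | tables_editor.py | file_name2title
-- ===== SOURCE A (Python) =====
-- def file_name2title(file_name):
--     # Verify argument types:
--     assert isinstance(file_name, str)
--
--     # Decode *file_name* into a list of *characters*:
--     characters = list()
--     index = 0
--     file_name_size = len(file_name)
--     while index < file_name_size:
--         character = file_name[index]
--         if character == '_':
--             # Underscores are always translated to spaces:
--             character = ' '
--             index += 1
--         elif character == '%':
--             # `%XX` is converted into a single *character*:
--             character = chr(int(file_name[index+1:index+3], 16))
--             index += 3
--         else:
--             # Everything else just taken as is: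
--             index += 1
--         characters.append(character)
--
--     # Join *characters* back into a single *title* string:
--     title = "".join(characters)
--     return title
-- ===== SOURCE B (Python) =====
-- def file_name2title(file_name):
--     # Verify argument types:
--     assert isinstance(file_name, str)
--
--     # Split on '%': every separator starts a two-hex-digit escape.  The text
--     # before the first '%' just gets underscores turned into spaces; every
--     # later segment starts with the escape's hex digits (decoded via chr) and
--     # the rest of it is literal text, underscores turned into spaces.
--     segments = file_name.split('%')
--     parts = [segments[0].replace('_', ' ')]
--     for segment in segments[1:]:
--         parts.append(chr(int(segment[:2], 16)) + segment[2:].replace('_', ' '))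
--     return ''.join(parts)
-- ===== Notes on version B (the rewrite author's own statement) =====
-- stated objective: faster
-- what changed: Replaces A's index-driven per-character while loop (with manual index jumps over escapes) by splitting the string on the escape marker once and mapping each segment: decode the segment's leading two hex digits with chr(int(seg[:2],16)) and replace underscores only in the literal remainder, then join.
import Mathlib
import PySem

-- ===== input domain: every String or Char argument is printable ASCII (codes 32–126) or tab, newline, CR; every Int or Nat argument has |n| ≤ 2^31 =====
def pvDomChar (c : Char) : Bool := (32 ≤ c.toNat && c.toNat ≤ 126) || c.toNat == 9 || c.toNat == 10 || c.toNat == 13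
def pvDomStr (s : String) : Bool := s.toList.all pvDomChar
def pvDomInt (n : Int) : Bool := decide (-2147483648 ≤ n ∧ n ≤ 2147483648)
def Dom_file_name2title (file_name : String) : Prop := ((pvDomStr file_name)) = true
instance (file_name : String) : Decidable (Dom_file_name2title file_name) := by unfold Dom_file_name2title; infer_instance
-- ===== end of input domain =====

-- B replaces A's index-driven character scan by split-on-'%' + per-segment decode/replace (a different decomposition of the same work).

-- ===== PORT A =====
-- A's while loop over `index`, with the appended `characters` accumulator.
def pvALoop (cs : List Char) (index : Nat) (acc : List Char) : List Char :=
  if _h : index < cs.length then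
    let character := cs[index]
    if character = '_' then
      pvALoop cs (index + 1) (acc ++ [' '])
    else if character = '%' then
      -- chr(int(file_name[index+1:index+3], 16)); Python raises where ofCharsBase? is none
      -- or the value is negative — exactly the inputs Pre_ excludes; .getD 0 / .toNat are unspecified there
      let code := (PySem.Int.ofCharsBase? (PySem.List.slice cs (some ((index : Int) + 1)) (some ((index : Int) + 3))) 16).getD 0
      pvALoop cs (index + 3) (acc ++ [Char.ofNat code.toNat])
    else
      pvALoop cs (index + 1) (acc ++ [character])
  else acc
termination_by cs.length - index

def file_name2title (file_name : String) : String :=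
  String.ofList (pvALoop file_name.toList 0 [])

-- ===== PORT B =====
-- segment.replace('_', ' '): a one-character pattern and replacement is exactly a character map.
def pvRepl (cs : List Char) : List Char := cs.map (fun c => if c = '_' then ' ' else c)

-- chr(int(segment[:2], 16)) + segment[2:].replace('_', ' ')  (the per-segment body of B's loop;
-- as in port A, .getD 0 / .toNat are unspecified outside Pre_, where Python raises)
def pvDecSeg (seg : List Char) : List Char :=
  Char.ofNat ((PySem.Int.ofCharsBase? (seg.take 2) 16).getD 0).toNat :: pvRepl (seg.drop 2)

def file_name2title_alt (file_name : String) : String :=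
  -- file_name.split('%') with a one-character separator is List.splitOn '%'
  match file_name.toList.splitOn '%' with
  | [] => ""   -- unreachable: split never returns an empty list
  | s0 :: rest => String.ofList (pvRepl s0 ++ rest.flatMap pvDecSeg)

-- ===== PRECONDITION & SPEC =====
-- Pre_ = exactly the inputs on which A returns: after every '%' the 2-character slice contains no '%'
-- and int(slice, 16) succeeds with a non-negative value (otherwise int() or chr() raises ValueError).
def Pre_file_name2title (file_name : String) : Prop :=
  ∀ i < file_name.toList.length, file_name.toList[i]? = some '%' →
    ('%' ∉ (file_name.toList.drop (i + 1)).take 2 ∧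
     0 ≤ ((PySem.Int.ofCharsBase? ((file_name.toList.drop (i + 1)).take 2) 16).getD (-1)))
instance (file_name : String) : Decidable (Pre_file_name2title file_name) := by
  unfold Pre_file_name2title; infer_instance

def pvWitness_file_name2title : String := "tri_state%2Fbuffer%3b"

def Spec_file_name2title (file_name : String) (out : String) : Prop := out = file_name2title_alt file_name
instance (file_name : String) (out : String) : Decidable (Spec_file_name2title file_name out) := by unfold Spec_file_name2title; infer_instance

-- ===== CLAIM (what is proved, stated in full; the proofs are below) =====
def Claim_equal_file_name2title : Prop := ∀ (file_name : String), Dom_file_name2title file_name → Pre_file_name2title file_name → Spec_file_name2title file_name (file_name2title file_name)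

-- ===== LEMMAS AND PROOFS =====

-- The decoded character list as one structural recursion (common form both ports are reduced to).
def pvSpine (cs : List Char) : List Char :=
  match cs with
  | [] => []
  | c :: rest =>
    if c = '_' then ' ' :: pvSpine rest
    else if c = '%' then
      Char.ofNat ((PySem.Int.ofCharsBase? (rest.take 2) 16).getD 0).toNat :: pvSpine (rest.drop 2)
    else c :: pvSpine rest
termination_by cs.length
decreasing_by all_goals (simp; try omega)

lemma pvSpine_nil : pvSpine [] = [] := by rw [pvSpine]

lemma pvSpine_und (rest : List Char) : pvSpine ('_' :: rest) = ' ' :: pvSpine rest := by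
  rw [pvSpine]; simp

lemma pvSpine_pct (rest : List Char) :
    pvSpine ('%' :: rest)
      = Char.ofNat ((PySem.Int.ofCharsBase? (rest.take 2) 16).getD 0).toNat :: pvSpine (rest.drop 2) := by
  rw [pvSpine]; simp

lemma pvSpine_other {c : Char} (rest : List Char) (h1 : c ≠ '_') (h2 : c ≠ '%') :
    pvSpine (c :: rest) = c :: pvSpine rest := by
  rw [pvSpine]; simp [h1, h2]

lemma pvALoop_eq_spine (cs : List Char) (index : Nat) (acc : List Char) :
    pvALoop cs index acc = acc ++ pvSpine (cs.drop index) := by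
  rw [pvALoop]
  split
  · rename_i h
    have hcons : cs.drop index = cs[index] :: cs.drop (index + 1) := List.drop_eq_getElem_cons h
    by_cases h1 : cs[index] = '_'
    · rw [if_pos h1, pvALoop_eq_spine cs (index + 1), hcons, h1, pvSpine_und]
      simp
    · by_cases h2 : cs[index] = '%'
      · have hs : PySem.List.slice cs (some ((index : Int) + 1)) (some ((index : Int) + 3))
            = (cs.drop (index + 1)).take 2 := by
          have e1 : ((index : Int) + 1) = ((index + 1 : Nat) : Int) := by push_cast; ring
          have e2 : ((index : Int) + 3) = ((index + 3 : Nat) : Int) := by push_cast; ring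
          rw [e1, e2, PySem.List.slice_natCast]
          congr 1
          omega
        rw [if_neg h1, if_pos h2, pvALoop_eq_spine cs (index + 3), hcons, h2, pvSpine_pct,
            List.drop_drop, hs]
        have e3 : index + 1 + 2 = index + 3 := by omega
        rw [e3]
        simp
      · rw [if_neg h1, if_neg h2, pvALoop_eq_spine cs (index + 1), hcons,
            pvSpine_other _ h1 h2]
        simp
  · rename_i h
    have hnil : cs.drop index = [] := List.drop_eq_nil_iff.mpr (by omega)
    rw [hnil, pvSpine_nil]
    simp
termination_by cs.length - index

-- "the two characters after every '%' are not '%' themselves", in append form.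
def pvNoPct (cs : List Char) : Prop :=
  ∀ pre suf : List Char, cs = pre ++ '%' :: suf → '%' ∉ suf.take 2

lemma pvNoPct_cons {c : Char} {cs : List Char} (h : pvNoPct (c :: cs)) : pvNoPct cs := by
  intro pre suf he
  exact h (c :: pre) suf (by simp [he])

lemma pvNoPct_drop {cs : List Char} (h : pvNoPct cs) (n : Nat) : pvNoPct (cs.drop n) := by
  intro pre suf he
  apply h (cs.take n ++ pre) suf
  rw [List.append_assoc, ← he]
  exact (List.take_append_drop n cs).symm

lemma pvPre_noPct (file_name : String) (h : Pre_file_name2title file_name) :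
    pvNoPct file_name.toList := by
  intro pre suf he
  have hlen : pre.length < file_name.toList.length := by rw [he]; simp
  have hget : file_name.toList[pre.length]? = some '%' := by
    rw [he, List.getElem?_append_right (le_refl pre.length)]
    simp
  have hdrop : file_name.toList.drop (pre.length + 1) = suf := by
    rw [he, ← List.drop_drop, List.drop_left]
    simp
  have := (h pre.length hlen hget).1
  rwa [hdrop] at this

lemma pvSpine_eq_split_aux : ∀ (n : Nat) (cs : List Char), cs.length ≤ n → pvNoPct cs →
    pvSpine cs = (match cs.splitOn '%' with
      | [] => []
      | s0 :: rest => pvRepl s0 ++ rest.flatMap pvDecSeg) := by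
  intro n
  induction n with
  | zero =>
    intro cs hlen _
    have : cs = [] := List.eq_nil_of_length_eq_zero (by omega)
    subst this
    simp [pvSpine_nil, List.splitOn, List.splitOnP_nil, pvRepl]
  | succ n IH =>
    intro cs hlen h
    rw [show cs.splitOn '%' = List.splitOnP (· == '%') cs from by simp [List.splitOn]]
    cases cs with
    | nil => simp [pvSpine_nil, List.splitOnP_nil, pvRepl]
    | cons c rest =>
      simp only [List.length_cons] at hlen
      by_cases h2 : c = '%'
      · subst h2
        have hnp : '%' ∉ rest.take 2 := h [] rest rfl
        rw [List.splitOnP_cons]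
        simp only [BEq.rfl, if_true]
        cases rest with
        | nil => simp [pvSpine_pct, pvSpine_nil, List.splitOnP_nil, pvDecSeg, pvRepl]
        | cons x rest2 =>
          have hx : x ≠ '%' := by intro e; exact hnp (by simp [e])
          cases rest2 with
          | nil =>
            rw [pvSpine_pct]
            simp [List.splitOnP_cons, List.splitOnP_nil, hx, pvDecSeg, pvRepl, pvSpine_nil]
          | cons y rest' =>
            have hy : y ≠ '%' := by intro e; exact hnp (by simp [e])
            obtain ⟨s0, r, hr⟩ :=
              List.exists_cons_of_ne_nil (List.splitOnP_ne_nil (· == '%') rest')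
            have hd : List.drop 2 (x :: y :: rest') = rest' := rfl
            have ht : List.take 2 (x :: y :: rest') = [x, y] := rfl
            rw [pvSpine_pct, hd, ht,
                IH rest' (by simp at hlen; omega) (pvNoPct_drop h 3),
                show rest'.splitOn '%' = List.splitOnP (· == '%') rest' from by simp [List.splitOn],
                hr, List.splitOnP_cons, List.splitOnP_cons, hr]
            simp [hx, hy, pvDecSeg, pvRepl]
      · obtain ⟨s0, r, hr⟩ :=
          List.exists_cons_of_ne_nil (List.splitOnP_ne_nil (· == '%') rest)
        by_cases h1 : c = '_'
        · subst h1
          rw [pvSpine_und, IH rest (by omega) (pvNoPct_cons h),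
              show rest.splitOn '%' = List.splitOnP (· == '%') rest from by simp [List.splitOn],
              hr, List.splitOnP_cons, hr]
          simp [pvRepl]
        · rw [pvSpine_other _ h1 h2, IH rest (by omega) (pvNoPct_cons h),
              show rest.splitOn '%' = List.splitOnP (· == '%') rest from by simp [List.splitOn],
              hr, List.splitOnP_cons, hr]
          simp [h1, h2, pvRepl]

lemma pvSpine_eq_split (cs : List Char) (h : pvNoPct cs) :
    pvSpine cs = (match cs.splitOn '%' with
      | [] => []
      | s0 :: rest => pvRepl s0 ++ rest.flatMap pvDecSeg) :=
  pvSpine_eq_split_aux cs.length cs (le_refl _) h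

-- ===== VERDICT (by name: the statement is the Claim_ definition above) =====
theorem file_name2title_spec : Claim_equal_file_name2title := by
  intro file_name _hdom hpre
  unfold Spec_file_name2title file_name2title file_name2title_alt
  rw [pvALoop_eq_spine, List.drop_zero, List.nil_append,
      pvSpine_eq_split _ (pvPre_noPct _ hpre)]
  have hne : file_name.toList.splitOn '%' ≠ [] := by
    simpa [List.splitOn] using List.splitOnP_ne_nil (· == '%') file_name.toList
  obtain ⟨s0, rest, he⟩ := List.exists_cons_of_ne_nil hne
  rw [he]
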